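-- pv_equiv track=rewrite | github.com/mkatouda/GRRMtools | grrmlist2xyz.py | get_natoms
-- ===== SOURCE A (Python) =====
-- def get_natoms(lines):
--     natoms = 0
--     count_atoms = False
--     for line in lines:
--         if 'Geometry' in line:
--             count_atoms = True
--         elif 'Energy' in line:
--             count_atoms = False
--             break
--         elif count_atoms:
--             natoms += 1
--     return natoms
-- ===== SOURCE B (Python) =====
-- def get_natoms(lines):
--     seq = list(lines)
--     kinds = ['G' if 'Geometry' in l else 'E' if 'Energy' in l else '.' for l in seq]
--     try:
--         g = kinds.index('G')
--     except ValueError: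
--         return 0
--     if 'E' in kinds[:g]:
--         return 0
--     after = kinds[g + 1:]
--     try:
--         after = after[:after.index('E')]
--     except ValueError:
--         pass
--     return after.count('.')
-- ===== Notes on version B (the rewrite author's own statement) =====
-- stated objective: alternative
-- what changed: Replaces A's stateful flag-driven scan by a classification pass (each line mapped to 'G'/'E'/'.') followed by index arithmetic and slicing: find the first 'G', return 0 if an 'E' precedes it, cut off at the first 'E' after it, and count the '.' marks in the slice -- no per-line boolean state machine.
import Mathlib
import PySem

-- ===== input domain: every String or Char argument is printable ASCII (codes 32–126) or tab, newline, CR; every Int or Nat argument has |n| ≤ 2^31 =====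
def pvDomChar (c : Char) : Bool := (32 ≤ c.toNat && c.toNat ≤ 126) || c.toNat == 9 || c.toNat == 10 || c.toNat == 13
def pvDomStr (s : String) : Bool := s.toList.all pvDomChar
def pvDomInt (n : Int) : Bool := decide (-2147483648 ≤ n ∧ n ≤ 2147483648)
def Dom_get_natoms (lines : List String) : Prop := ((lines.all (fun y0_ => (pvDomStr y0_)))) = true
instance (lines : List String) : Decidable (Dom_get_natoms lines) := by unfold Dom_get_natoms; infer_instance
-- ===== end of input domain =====

-- B replaces A's flag-driven state-machine scan by a classification list ('G'/'E'/'.') plus index arithmetic, slicing and counting; same cost, different decomposition.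

-- ===== PORT A =====
-- A's for-loop with state (natoms, count_atoms); break returns the accumulator.
def getNatomsLoopA : List String → Int → Bool → Int
  | [], natoms, _ => natoms
  | line :: rest, natoms, count_atoms =>
    if PySem.Str.isIn "Geometry" line then getNatomsLoopA rest natoms true
    else if PySem.Str.isIn "Energy" line then natoms
    else if count_atoms then getNatomsLoopA rest (natoms + 1) count_atoms
    else getNatomsLoopA rest natoms count_atoms

def get_natoms (lines : List String) : Int := getNatomsLoopA lines 0 false

-- ===== PORT B =====
-- Source B's per-line classification: 'G' if 'Geometry' in l else 'E' if 'Energy' in l else '.'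
def classifyB (l : String) : Char :=
  if PySem.Str.isIn "Geometry" l then 'G'
  else if PySem.Str.isIn "Energy" l then 'E'
  else '.'

-- Source B's body after the comprehension: index of 'G', 'E'-before-G test, slice to the first 'E' after, count '.'
def bodyB (kinds : List Char) : Int :=
  match PySem.List.index? kinds 'G' with
  | none => 0
  | some g =>
    if (PySem.List.slice kinds none (some (g : Int))).contains 'E' then 0
    else
      let after := PySem.List.slice kinds (some ((g : Int) + 1)) none
      let region :=
        match PySem.List.index? after 'E' with
        | none => after
        | some e => PySem.List.slice after none (some (e : Int))
      (PySem.List.count region '.' : Int)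

def get_natoms_alt (lines : List String) : Int := bodyB (lines.map classifyB)

-- ===== PRECONDITION & SPEC =====
def Spec_get_natoms (lines : List String) (out : Int) : Prop := out = get_natoms_alt lines
instance (lines : List String) (out : Int) : Decidable (Spec_get_natoms lines out) := by unfold Spec_get_natoms; infer_instance

-- ===== CLAIM (what is proved, stated in full; the proofs are below) =====
def Claim_equal_get_natoms : Prop := ∀ (lines : List String), Dom_get_natoms lines → Spec_get_natoms lines (get_natoms lines)

-- ===== LEMMAS AND PROOFS =====

-- reference recursion on the classification list: count '.' before the first 'E'
def cntL : List Char → Int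
  | [] => 0
  | c :: r => if c = 'E' then 0 else (if c = '.' then 1 else 0) + cntL r

-- reference recursion: skip to the first 'G' ('E' first gives 0), then cntL
def altL : List Char → Int
  | [] => 0
  | c :: r => if c = 'G' then cntL r else if c = 'E' then 0 else altL r

theorem cnt_region (ks : List Char) :
    ((match PySem.List.index? ks 'E' with
      | none => ks
      | some e => PySem.List.slice ks none (some (e : Int))).count '.' : Int) = cntL ks := by
  induction ks with
  | nil => rfl
  | cons c r ih =>
    by_cases hE : c = 'E'
    · subst hE
      rw [PySem.List.index?_cons_self]
      simp [cntL]
    · rw [PySem.List.index?_cons_of_ne r hE]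
      cases h : PySem.List.index? r 'E' with
      | none =>
        rw [h] at ih
        dsimp only at ih
        simp only [cntL, hE, if_false, ← ih]
        by_cases hd : c = '.' <;> simp [hd] <;> ring
      | some e =>
        rw [h] at ih
        dsimp only at ih
        simp only [Option.map_some]
        rw [PySem.List.slice_to_natCast, List.take_succ_cons]
        rw [PySem.List.slice_to_natCast] at ih
        simp only [List.count_cons, cntL, hE, if_false]
        by_cases hd : c = '.' <;> simp [hd, ← ih] <;> ring

theorem body_eq_altL (ks : List Char) : bodyB ks = altL ks := by
  induction ks with
  | nil => rfl
  | cons c r ih =>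
    by_cases hG : c = 'G'
    · subst hG
      unfold bodyB
      rw [PySem.List.index?_cons_self]
      dsimp only
      rw [PySem.List.slice_to_natCast]
      have h1 : ((0 : Nat) : Int) + 1 = (1 : Int) := by norm_num
      rw [h1, PySem.List.slice_from_one]
      dsimp only [List.take_zero, List.tail_cons]
      have h2 : altL ('G' :: r) = cntL r := by simp [altL]
      rw [h2, ← cnt_region r]
      simp [PySem.List.count_eq]
    · unfold bodyB at ih ⊢
      rw [PySem.List.index?_cons_of_ne r hG]
      cases h : PySem.List.index? r 'G' with
      | none =>
        rw [h] at ih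
        dsimp only at ih
        simp only [altL, hG, if_false]
        by_cases hE : c = 'E' <;> simp [hE, ← ih]
      | some g =>
        rw [h] at ih
        dsimp only at ih
        simp only [Option.map_some]
        by_cases hE : c = 'E'
        · subst hE
          rw [PySem.List.slice_to_natCast, List.take_succ_cons]
          simp [altL]
        · have hc : ((g : Nat) : Int) + 1 = ((g + 1 : Nat) : Int) := by push_cast; ring
          have hc3 : (((g + 1 : Nat)) : Int) + 1 = ((g + 2 : Nat) : Int) := by push_cast; ring
          rw [hc3, PySem.List.slice_to_natCast, PySem.List.slice_from_natCast, List.take_succ_cons,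
            List.drop_succ_cons]
          rw [hc, PySem.List.slice_from_natCast, PySem.List.slice_to_natCast] at ih
          have hcont : (c :: List.take g r).contains 'E' = (List.take g r).contains 'E' := by
            simp
            exact fun hx => absurd hx.symm hE
          rw [hcont, ih]
          simp [altL, hG, hE]

theorem loopA_true (ls : List String) : ∀ n, getNatomsLoopA ls n true = n + cntL (ls.map classifyB) := by
  induction ls with
  | nil => intro n; simp [getNatomsLoopA, cntL]
  | cons l rest ih =>
    intro n
    by_cases h1 : PySem.Str.isIn "Geometry" l = true
    · simp only [getNatomsLoopA, List.map_cons, classifyB, cntL, h1, if_true, ih]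
      simp
    · by_cases h2 : PySem.Str.isIn "Energy" l = true
      · simp only [getNatomsLoopA, List.map_cons, classifyB, cntL, h1, h2, if_true]
        simp
      · simp only [getNatomsLoopA, List.map_cons, classifyB, cntL, h1, h2, ih]
        simp
        omega

theorem loopA_false (ls : List String) : getNatomsLoopA ls 0 false = altL (ls.map classifyB) := by
  induction ls with
  | nil => rfl
  | cons l rest ih =>
    by_cases h1 : PySem.Str.isIn "Geometry" l = true
    · simp only [getNatomsLoopA, List.map_cons, classifyB, altL, h1, if_true, loopA_true]
      simp
    · by_cases h2 : PySem.Str.isIn "Energy" l = true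
      · simp only [getNatomsLoopA, List.map_cons, classifyB, altL, h1, h2, if_true]
        simp
      · simp only [getNatomsLoopA, List.map_cons, classifyB, altL, h1, h2, ih]
        simp

-- ===== VERDICT (by name: the statement is the Claim_ definition above) =====
theorem get_natoms_spec : Claim_equal_get_natoms := by
  intro lines _
  unfold Spec_get_natoms get_natoms get_natoms_alt
  rw [loopA_false, body_eq_altL]
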